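-- pv_equiv track=rewrite | github.com/warmfrost-dev/wrye-bash | Mopy/bash/_games_lo.py | _check_active_order
-- ===== SOURCE A (Python) =====
-- def _check_active_order(acti, lord):
--     dex_dict = {mod: index for index, mod in enumerate(lord)}
--     old = acti[:]
--     acti.sort(key=dex_dict.__getitem__) # all present in lord
--     if acti != old: # active mods order that disagrees with lord ?
--         return (u'Active list order of plugins (%s) differs from supplied '
--                 u'load order (%s)') % (_pl(old), _pl(acti))
--     return u''
--
-- def _pl(it, legend=u'', joint=u', '):
--     return legend + joint.join(u'%s' % x for x in it) # use Path.__unicode__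
-- ===== SOURCE B (Python) =====
-- def _check_active_order(acti, lord):
--     # Bucket (pigeonhole) reorder by load-order position instead of a comparison sort.
--     pos = {mod: i for i, mod in enumerate(lord)}
--     old = acti[:]
--     buckets = [[] for _ in lord]
--     for mod in acti:
--         buckets[pos[mod]].append(mod)
--     acti[:] = [m for b in buckets for m in b]
--     if acti != old:
--         return (u'Active list order of plugins (%s) differs from supplied '
--                 u'load order (%s)') % (_pl(old), _pl(acti))
--     return u''
--
-- def _pl(it, legend=u'', joint=u', '):
--     return legend + joint.join(u'%s' % x for x in it)
-- ===== Notes on version B (the rewrite author's own statement) =====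
-- stated objective: alternative
-- what changed: Replaces the in-place stable comparison sort keyed by load-order index with a bucket (pigeonhole) distribution: one pass appends each active mod to the bucket at its load-order position, then the buckets are flattened.
import Mathlib
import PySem

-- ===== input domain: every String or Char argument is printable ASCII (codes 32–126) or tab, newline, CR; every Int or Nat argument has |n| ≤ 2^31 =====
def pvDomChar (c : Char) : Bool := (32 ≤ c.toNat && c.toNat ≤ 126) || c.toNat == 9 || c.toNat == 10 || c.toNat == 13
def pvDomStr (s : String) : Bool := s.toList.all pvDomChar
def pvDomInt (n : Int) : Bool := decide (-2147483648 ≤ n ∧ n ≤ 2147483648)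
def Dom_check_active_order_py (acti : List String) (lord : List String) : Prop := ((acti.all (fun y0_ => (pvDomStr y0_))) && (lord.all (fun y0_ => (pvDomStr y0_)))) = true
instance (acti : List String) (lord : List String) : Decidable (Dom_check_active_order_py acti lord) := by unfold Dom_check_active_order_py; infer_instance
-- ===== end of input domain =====

-- B replaces the in-place comparison sort keyed by load-order index with a bucket (pigeonhole)
-- distribution over load-order positions (objective: alternative algorithm, same result).
-- Both Pythons mutate `acti` in place identically; the equivalence proved here is about the return value.

-- ===== PORT A =====
-- shared helper: {mod: index for index, mod in enumerate(lord)} (later duplicates overwrite)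
def pvDex (lord : List String) : PySem.Dict String Int :=
  (PySem.List.enumerate lord 0).foldl (fun d p => d.insert p.2 p.1) PySem.Dict.empty

-- shared helper: _pl(it) with default legend u'' and joint u', '
def pvPl (it : List String) : String := PySem.Str.join ", " it

-- shared helper: the format-string message
def pvMsg (old new_ : List String) : String :=
  "Active list order of plugins (" ++ pvPl old ++ ") differs from supplied load order (" ++ pvPl new_ ++ ")"

-- A: acti.sort(key=dex_dict.__getitem__); the key is total here via getD (Python raises KeyError
-- exactly on the inputs Pre_ excludes)
def check_active_order_py (acti : List String) (lord : List String) : String :=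
  let dex := pvDex lord
  let old := acti
  let sortedActi := PySem.List.sorted acti (fun m => dex.getD m 0) false
  if sortedActi ≠ old then pvMsg old sortedActi else ""

-- ===== PORT B =====
-- B: buckets = [[] for _ in lord]; for mod in acti: buckets[pos[mod]].append(mod); flatten.
-- The index pos[mod] is a nonnegative enumerate index inside Pre_, so .toNat is exact.
def check_active_order_py_alt (acti : List String) (lord : List String) : String :=
  let pos := pvDex lord
  let old := acti
  let buckets := acti.foldl
    (fun bs m => let k := (pos.getD m 0).toNat; bs.set k (bs.getD k [] ++ [m]))
    (lord.map fun _ => ([] : List String))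
  let newActi := buckets.flatten
  if newActi ≠ old then pvMsg old newActi else ""

-- ===== PRECONDITION & SPEC =====
-- Pre_ excludes exactly the inputs where some active mod is absent from lord: there both
-- Pythons raise KeyError (A in the sort key, B at pos[mod]).
def Pre_check_active_order_py (acti : List String) (lord : List String) : Prop :=
  ∀ m ∈ acti, m ∈ lord
instance (acti : List String) (lord : List String) : Decidable (Pre_check_active_order_py acti lord) := by unfold Pre_check_active_order_py; infer_instance

def pvWitness_check_active_order_py : List String × List String := (["b.esp", "a.esp"], ["a.esp", "b.esp"])

def Spec_check_active_order_py (acti : List String) (lord : List String) (out : String) : Prop := out = check_active_order_py_alt acti lord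
instance (acti : List String) (lord : List String) (out : String) : Decidable (Spec_check_active_order_py acti lord out) := by unfold Spec_check_active_order_py; infer_instance

-- ===== CLAIM (what is proved, stated in full; the proofs are below) =====
def Claim_equal_check_active_order_py : Prop := ∀ (acti : List String) (lord : List String), Dom_check_active_order_py acti lord → Pre_check_active_order_py acti lord → Spec_check_active_order_py acti lord (check_active_order_py acti lord)

-- ===== LEMMAS AND PROOFS =====

-- the dict built from enumerate(lord) maps every member of lord to some index < lord.length
lemma pvDexFold_range (n : Nat) (ps : List (Int × String)) (d0 : PySem.Dict String Int) (m : String)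
    (hps : ∀ p ∈ ps, ∃ k, k < n ∧ p.1 = (k : Int))
    (hm : m ∈ ps.map Prod.snd ∨ ∃ k, k < n ∧ d0.getD m 0 = (k : Int)) :
    ∃ k, k < n ∧ (ps.foldl (fun d p => d.insert p.2 p.1) d0).getD m 0 = (k : Int) := by
  induction ps generalizing d0 with
  | nil =>
    simpa using hm
  | cons p ps ih =>
    apply ih
    · intro q hq; exact hps q (List.mem_cons_of_mem _ hq)
    · rcases hm with hm | ⟨k, hk, hd⟩
      · rcases List.mem_map.1 hm with ⟨q, hq, hqm⟩
        rcases List.mem_cons.1 hq with rfl | hq'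
        · right
          rcases hps q (List.mem_cons_self) with ⟨k, hk, hk1⟩
          exact ⟨k, hk, by subst hqm; simpa [PySem.Dict.getD_insert_self] using hk1⟩
        · left; exact List.mem_map.2 ⟨q, hq', hqm⟩
      · by_cases hmp : m = p.2
        · right
          rcases hps p (List.mem_cons_self) with ⟨k', hk', hk1⟩
          exact ⟨k', hk', by subst hmp; simpa [PySem.Dict.getD_insert_self] using hk1⟩
        · right; exact ⟨k, hk, by rwa [PySem.Dict.getD_insert_of_ne _ _ _ hmp]⟩

lemma pvDex_range (lord : List String) (m : String) (hm : m ∈ lord) :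
    ∃ k, k < lord.length ∧ (pvDex lord).getD m 0 = (k : Int) := by
  apply pvDexFold_range
  · intro p hp
    rcases (PySem.List.mem_enumerate_iff lord 0 p).1 hp with ⟨k, hk, rfl⟩
    exact ⟨k, hk, by simp⟩
  · left; simpa [PySem.List.map_snd_enumerate] using hm

lemma pvInsertBy_append_left (p : String → String → Bool) (x : String) (l r : List String)
    (h : ∀ y ∈ l, p x y = false) :
    PySem.List.insertBy p x (l ++ r) = l ++ PySem.List.insertBy p x r := by
  induction l with
  | nil => simp
  | cons y l ih =>
    have hy : p x y = false := h y List.mem_cons_self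
    simp [PySem.List.insertBy, hy, ih (fun z hz => h z (List.mem_cons_of_mem _ hz))]

lemma pvInsertBy_front (p : String → String → Bool) (x : String) (r : List String)
    (h : ∀ y ∈ r, p x y = true) :
    PySem.List.insertBy p x r = x :: r := by
  cases r with
  | nil => simp [PySem.List.insertBy]
  | cons y r => simp [PySem.List.insertBy, h y List.mem_cons_self]

-- inserting x (bucket index k) into the flattened buckets appends it to bucket k
lemma pvInsertBy_flatten (p : String → String → Bool) (x : String) :
    ∀ (bs : List (List String)) (k : Nat) (hk : k < bs.length),
      (∀ i (h : i < bs.length), i ≤ k → ∀ m ∈ bs[i], p x m = false) →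
      (∀ i (h : i < bs.length), k < i → ∀ m ∈ bs[i], p x m = true) →
      PySem.List.insertBy p x bs.flatten = (bs.set k (bs[k] ++ [x])).flatten := by
  intro bs
  induction bs with
  | nil => intro k hk; exact absurd hk (by simp)
  | cons b bs ih =>
    intro k hk h1 h2
    cases k with
    | zero =>
      have hb : ∀ y ∈ b, p x y = false := fun y hy =>
        h1 0 (by simp) (Nat.le_refl 0) y (by simpa using hy)
      have hr : ∀ y ∈ bs.flatten, p x y = true := by
        intro y hy
        rcases List.mem_flatten.1 hy with ⟨l, hl, hyl⟩
        rcases List.mem_iff_getElem.1 hl with ⟨i, hi, rfl⟩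
        exact h2 (i + 1) (by simpa using Nat.succ_lt_succ hi) (Nat.succ_pos i) y (by simpa using hyl)
      simp only [List.flatten_cons]
      rw [pvInsertBy_append_left p x b _ hb, pvInsertBy_front p x _ hr]
      simp
    | succ j =>
      have hb : ∀ y ∈ b, p x y = false := fun y hy =>
        h1 0 (by simp) (Nat.zero_le _) y (by simpa using hy)
      simp only [List.flatten_cons]
      rw [pvInsertBy_append_left p x b _ hb]
      rw [ih j (by simpa using Nat.lt_of_succ_lt_succ hk)
        (fun i hi hik m hm => h1 (i + 1) (by simpa using Nat.succ_lt_succ hi)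
          (Nat.succ_le_succ hik) m (by simpa using hm))
        (fun i hi hik m hm => h2 (i + 1) (by simpa using Nat.succ_lt_succ hi)
          (Nat.succ_lt_succ hik) m (by simpa using hm))]
      simp

-- the insertion-sort fold over acti equals B's bucket fold, flattened
lemma pvFold_bridge (key : String → Int) (n : Nat) :
    ∀ (acti : List String) (bs : List (List String)),
      (∀ m ∈ acti, ∃ k, k < n ∧ key m = (k : Int)) →
      bs.length = n →
      (∀ i (h : i < bs.length), ∀ m ∈ bs[i], key m = (i : Int)) →
      acti.foldl (fun acc x => PySem.List.insertBy (fun a b => decide (key a < key b)) x acc) bs.flatten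
        = (acti.foldl (fun bs m => let k := (key m).toNat; bs.set k (bs.getD k [] ++ [m])) bs).flatten := by
  intro acti
  induction acti with
  | nil => intro bs _ _ _; rfl
  | cons x acti ih =>
    intro bs hkeys hlen hinv
    rcases hkeys x List.mem_cons_self with ⟨k, hk, hkx⟩
    have hkbs : k < bs.length := hlen ▸ hk
    have hstep : PySem.List.insertBy (fun a b => decide (key a < key b)) x bs.flatten
        = (bs.set k (bs[k] ++ [x])).flatten := by
      apply pvInsertBy_flatten
      · intro i hi hik m hm
        have := hinv i hi m hm
        simp only [decide_eq_false_iff_not, not_lt, hkx, this]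
        exact_mod_cast hik
      · intro i hi hik m hm
        have := hinv i hi m hm
        simp only [decide_eq_true_eq, hkx, this]
        exact_mod_cast hik
    have hgetD : bs.getD k [] = bs[k] := List.getD_eq_getElem bs [] hkbs
    have htoNat : (key x).toNat = k := by rw [hkx]; exact Int.toNat_natCast k
    simp only [List.foldl_cons, hstep, htoNat, hgetD]
    apply ih
    · intro m hm; exact hkeys m (List.mem_cons_of_mem _ hm)
    · simpa using hlen
    · intro i hi m hm
      rw [List.getElem_set] at hm
      by_cases hik : k = i
      · subst hik
        rw [if_pos rfl] at hm
        rcases List.mem_append.1 hm with hm | hm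
        · exact hinv k (by simpa using hi) m hm
        · have hmx : m = x := by simpa using hm
          subst hmx; exact hkx
      · rw [if_neg hik] at hm
        exact hinv i (by simpa using hi) m hm

lemma pvFlatten_init (lord : List String) : (lord.map fun _ => ([] : List String)).flatten = [] := by
  induction lord with
  | nil => rfl
  | cons _ _ ih => simp

-- ===== VERDICT (by name: the statement is the Claim_ definition above) =====
theorem check_active_order_py_spec : Claim_equal_check_active_order_py := by
  intro acti lord _hdom hpre
  unfold Spec_check_active_order_py check_active_order_py check_active_order_py_alt
  have hsorted : PySem.List.sorted acti (fun m => (pvDex lord).getD m 0) false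
      = (acti.foldl
          (fun bs m => let k := ((pvDex lord).getD m 0).toNat; bs.set k (bs.getD k [] ++ [m]))
          (lord.map fun _ => ([] : List String))).flatten := by
    rw [PySem.List.sorted_eq_foldl_insertBy]
    have := pvFold_bridge (fun m => (pvDex lord).getD m 0) lord.length acti
      (lord.map fun _ => ([] : List String))
      (fun m hm => pvDex_range lord m (hpre m hm))
      (by simp)
      (by intro i hi m hm; simp at hm)
    rw [← this, pvFlatten_init]
  simp only [hsorted]
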